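-- pv_equiv track=rewrite | github.com/abbyluggery/Full-ND-app-build | scripts/extract_recipes_from_excel.py | match_recipe_to_meal
-- ===== SOURCE A (Python) =====
-- def match_recipe_to_meal(recipe, existing_meals, name_column):
--     """Match Excel recipe to Salesforce meal name"""
--     excel_name = recipe.get(name_column, '').strip()
--
--     if not excel_name:
--         return None, None
--
--     # Try exact match
--     if excel_name in existing_meals:
--         return excel_name, existing_meals[excel_name]
--
--     # Try case-insensitive
--     for meal_name, meal_id in existing_meals.items():
--         if excel_name.lower() == meal_name.lower():
--             return meal_name, meal_id
--
--     # Try partial match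
--     for meal_name, meal_id in existing_meals.items():
--         if excel_name.lower() in meal_name.lower() or meal_name.lower() in excel_name.lower():
--             return meal_name, meal_id
--
--     return None, None
-- ===== SOURCE B (Python) =====
-- def match_recipe_to_meal(recipe, existing_meals, name_column):
--     """Match Excel recipe to Salesforce meal name (score-then-select)."""
--     excel_name = recipe.get(name_column, '').strip()
--     if not excel_name:
--         return None, None
--     if excel_name in existing_meals:
--         return excel_name, existing_meals[excel_name]
--     low = excel_name.lower()
--     scored = [(0 if low == m.lower() else 1, m, i)
--               for m, i in existing_meals.items()
--               if low in m.lower() or m.lower() in low]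
--     best = None
--     for t in scored:
--         if best is None or t[0] < best[0]:
--             best = t
--     if best is None:
--         return None, None
--     return best[1], best[2]
-- ===== Notes on version B (the rewrite author's own statement) =====
-- stated objective: alternative
-- what changed: A's two early-return scans (case-insensitive, then substring) are replaced by a score-then-select pass: one comprehension tags every loose match with tier 0 (case-insensitive) or 1 (substring), then a stable running-minimum loop over the scored list picks the first best-tier candidate.
import Mathlib
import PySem

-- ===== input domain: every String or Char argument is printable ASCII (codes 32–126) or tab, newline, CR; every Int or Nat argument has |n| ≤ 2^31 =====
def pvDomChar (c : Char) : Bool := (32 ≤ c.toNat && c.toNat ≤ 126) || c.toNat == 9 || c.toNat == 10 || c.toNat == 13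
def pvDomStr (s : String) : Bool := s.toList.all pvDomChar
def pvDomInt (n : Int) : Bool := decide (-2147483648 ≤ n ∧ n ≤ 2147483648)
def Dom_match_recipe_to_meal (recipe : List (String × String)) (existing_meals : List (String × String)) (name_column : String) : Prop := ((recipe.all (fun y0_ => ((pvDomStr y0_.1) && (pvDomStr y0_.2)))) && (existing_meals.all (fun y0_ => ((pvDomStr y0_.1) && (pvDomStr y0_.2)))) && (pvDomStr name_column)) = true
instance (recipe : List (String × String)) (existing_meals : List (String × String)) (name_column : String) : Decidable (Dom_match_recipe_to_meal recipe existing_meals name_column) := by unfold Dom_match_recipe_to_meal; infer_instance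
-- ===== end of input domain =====

-- B replaces A's two early-return scans by a score-then-select pass: one comprehension
-- tags every loose match with tier 0 (case-insensitive) or 1 (substring), then a stable
-- running-minimum fold picks the winner (alternative decomposition, no speed claim).

-- ===== PORT A =====
-- for meal_name, meal_id in …: if excel.lower() == meal_name.lower(): return …
def mrtmCI (excel : String) : List (String × String) → Option (String × String)
  | [] => none
  | (n, i) :: rest =>
    if PySem.Str.lower excel = PySem.Str.lower n then some (n, i) else mrtmCI excel rest

-- for meal_name, meal_id in …: if excel.lower() in m.lower() or m.lower() in excel.lower(): return …
def mrtmSub (excel : String) : List (String × String) → Option (String × String)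
  | [] => none
  | (n, i) :: rest =>
    if (PySem.Str.isIn (PySem.Str.lower excel) (PySem.Str.lower n)
        || PySem.Str.isIn (PySem.Str.lower n) (PySem.Str.lower excel)) = true
    then some (n, i) else mrtmSub excel rest

def match_recipe_to_meal (recipe : List (String × String)) (existing_meals : List (String × String)) (name_column : String) : Option String × Option String :=
  let excel_name := PySem.Str.strip ((List.lookup name_column recipe).getD "")
  if excel_name = "" then (none, none)
  else
    match List.lookup excel_name existing_meals with
    | some v => (some excel_name, some v)
    | none =>
      match mrtmCI excel_name existing_meals with
      | some (n, i) => (some n, some i)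
      | none =>
        match mrtmSub excel_name existing_meals with
        | some (n, i) => (some n, some i)
        | none => (none, none)

-- ===== PORT B =====
-- the comprehension: keep every loose match, tagged 0 (case-insensitive) / 1 (substring)
def mrtmScored (excel : String) (meals : List (String × String)) : List (Nat × String × String) :=
  meals.filterMap (fun p =>
    if (PySem.Str.isIn (PySem.Str.lower excel) (PySem.Str.lower p.1)
        || PySem.Str.isIn (PySem.Str.lower p.1) (PySem.Str.lower excel)) = true
    then some ((if PySem.Str.lower excel = PySem.Str.lower p.1 then 0 else 1), p.1, p.2)
    else none)

-- for t in scored: if best is None or t[0] < best[0]: best = t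
def mrtmBest (init : Option (Nat × String × String)) (ts : List (Nat × String × String)) : Option (Nat × String × String) :=
  ts.foldl (fun best t =>
    match best with
    | none => some t
    | some b => if t.1 < b.1 then some t else some b) init

def match_recipe_to_meal_alt (recipe : List (String × String)) (existing_meals : List (String × String)) (name_column : String) : Option String × Option String :=
  let excel_name := PySem.Str.strip ((List.lookup name_column recipe).getD "")
  if excel_name = "" then (none, none)
  else
    match List.lookup excel_name existing_meals with
    | some v => (some excel_name, some v)
    | none =>
      match mrtmBest none (mrtmScored excel_name existing_meals) with
      | some (_, n, i) => (some n, some i)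
      | none => (none, none)

-- ===== PRECONDITION & SPEC =====
def Spec_match_recipe_to_meal (recipe : List (String × String)) (existing_meals : List (String × String)) (name_column : String) (out : Option String × Option String) : Prop := out = match_recipe_to_meal_alt recipe existing_meals name_column
instance (recipe : List (String × String)) (existing_meals : List (String × String)) (name_column : String) (out : Option String × Option String) : Decidable (Spec_match_recipe_to_meal recipe existing_meals name_column out) := by unfold Spec_match_recipe_to_meal; infer_instance

-- ===== CLAIM =====
def Claim_equal_match_recipe_to_meal : Prop := ∀ (recipe : List (String × String)) (existing_meals : List (String × String)) (name_column : String), Dom_match_recipe_to_meal recipe existing_meals name_column → Spec_match_recipe_to_meal recipe existing_meals name_column (match_recipe_to_meal recipe existing_meals name_column)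

-- ===== LEMMAS AND PROOFS =====
theorem str_isIn_self (s : String) : PySem.Str.isIn s s = true := by
  simp [PySem.Str.isIn_eq, PySem.Chars.isIn_iff_infix]

theorem mrtmScored_cons_pos (excel n i : String) (rest : List (String × String))
    (hin : (PySem.Str.isIn (PySem.Str.lower excel) (PySem.Str.lower n)
        || PySem.Str.isIn (PySem.Str.lower n) (PySem.Str.lower excel)) = true) :
    mrtmScored excel ((n, i) :: rest) =
      ((if PySem.Str.lower excel = PySem.Str.lower n then 0 else 1), n, i) :: mrtmScored excel rest := by
  simp only [mrtmScored, List.filterMap_cons, hin, if_true]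

theorem mrtmScored_cons_neg (excel n i : String) (rest : List (String × String))
    (hin : ¬ (PySem.Str.isIn (PySem.Str.lower excel) (PySem.Str.lower n)
        || PySem.Str.isIn (PySem.Str.lower n) (PySem.Str.lower excel)) = true) :
    mrtmScored excel ((n, i) :: rest) = mrtmScored excel rest := by
  simp only [mrtmScored, List.filterMap_cons, if_neg hin]

theorem mrtmBest_cons (b : Option (Nat × String × String)) (t : Nat × String × String)
    (ts : List (Nat × String × String)) :
    mrtmBest b (t :: ts) =
      mrtmBest (match b with
        | none => some t
        | some b' => if t.1 < b'.1 then some t else some b') ts := rfl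

-- once the accumulator holds a tier-0 candidate the fold never replaces it
theorem mrtmBest_keep0 (ts : List (Nat × String × String)) (n i : String) :
    mrtmBest (some (0, n, i)) ts = some (0, n, i) := by
  induction ts with
  | nil => rfl
  | cons t rest ih => rw [mrtmBest_cons]; simpa using ih

theorem mrtmBest_scored (excel : String) (meals : List (String × String)) :
    ∀ (b : Option (Nat × String × String)), (b = none ∨ ∃ n i, b = some (1, n, i)) →
    mrtmBest b (mrtmScored excel meals) =
      match mrtmCI excel meals with
      | some (n, i) => some (0, n, i)
      | none =>
        match b with
        | some p => some p
        | none => (mrtmSub excel meals).map (fun p => (1, p.1, p.2)) := by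
  induction meals with
  | nil =>
    intro b hb
    rcases hb with h | ⟨n, i, h⟩ <;> subst h <;> rfl
  | cons hd rest ih =>
    intro b hb
    obtain ⟨n, i⟩ := hd
    by_cases hci : PySem.Str.lower excel = PySem.Str.lower n
    · have hin : (PySem.Str.isIn (PySem.Str.lower excel) (PySem.Str.lower n)
          || PySem.Str.isIn (PySem.Str.lower n) (PySem.Str.lower excel)) = true := by
        rw [hci, str_isIn_self, Bool.true_or]
      rw [mrtmScored_cons_pos excel n i rest hin, mrtmBest_cons]
      have hbest : (match b with
          | none => some ((if PySem.Str.lower excel = PySem.Str.lower n then 0 else 1), n, i)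
          | some b' => if (if PySem.Str.lower excel = PySem.Str.lower n then 0 else 1) < b'.1
              then some ((if PySem.Str.lower excel = PySem.Str.lower n then 0 else 1), n, i)
              else some b') = some (0, n, i) := by
        rcases hb with h | ⟨n', i', h⟩ <;> subst h <;> simp [if_pos hci]
      rw [hbest, mrtmBest_keep0]
      simp only [mrtmCI, if_pos hci]
    · by_cases hin : (PySem.Str.isIn (PySem.Str.lower excel) (PySem.Str.lower n)
          || PySem.Str.isIn (PySem.Str.lower n) (PySem.Str.lower excel)) = true
      · rw [mrtmScored_cons_pos excel n i rest hin, mrtmBest_cons]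
        have hbest : (match b with
            | none => some ((if PySem.Str.lower excel = PySem.Str.lower n then 0 else 1), n, i)
            | some b' => if (if PySem.Str.lower excel = PySem.Str.lower n then 0 else 1) < b'.1
                then some ((if PySem.Str.lower excel = PySem.Str.lower n then 0 else 1), n, i)
                else some b') = some (1, (match b with
                  | none => (n, i)
                  | some b' => (b'.2.1, b'.2.2)).1, (match b with
                  | none => (n, i)
                  | some b' => (b'.2.1, b'.2.2)).2) := by
          rcases hb with h | ⟨n', i', h⟩ <;> subst h <;> simp [if_neg hci]
        rw [hbest, ih _ (Or.inr ⟨_, _, rfl⟩)]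
        simp only [mrtmCI, if_neg hci, mrtmSub, hin, if_true]
        rcases hb with h | ⟨n', i', h⟩ <;> subst h <;>
          cases mrtmCI excel rest <;> simp
      · rw [mrtmScored_cons_neg excel n i rest hin, ih b hb]
        simp only [mrtmCI, if_neg hci, mrtmSub, if_neg hin]

-- ===== VERDICT =====
theorem match_recipe_to_meal_spec : Claim_equal_match_recipe_to_meal := by
  intro recipe meals col _
  unfold Spec_match_recipe_to_meal match_recipe_to_meal match_recipe_to_meal_alt
  simp only [mrtmBest_scored _ _ none (Or.inl rfl)]
  cases mrtmCI (PySem.Str.strip ((List.lookup col recipe).getD "")) meals with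
  | some p => obtain ⟨n, i⟩ := p; rfl
  | none =>
    cases mrtmSub (PySem.Str.strip ((List.lookup col recipe).getD "")) meals with
    | some p => obtain ⟨n, i⟩ := p; rfl
    | none => rfl
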